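-- pv_equiv track=rewrite | github.com/porciuscato/study_algorithm | 라인코테/p5.py | solution
-- ===== SOURCE A (Python) =====
-- def solution(dataSource, tags):
--     documents = []
--     for data in dataSource:
--         tag_list = data[1:]
--         tag_count = 0
--         for tag in tags:
--             if tag in tag_list:
--                 tag_count += 1
--         documents.append([data[0], tag_count])
--     documents.sort(key=lambda x: (-x[1], x[0]))
--
--     answer = []
--     tot = 0
--     for document in documents:
--         if document[1]:
--             answer.append(document[0])
--             tot += 1
--             if tot == 10:
--                 break
--     return answer
-- ===== SOURCE B (Python) =====
-- def solution(dataSource, tags):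
--     # Bucket documents by their match count (counting-sort style selection):
--     # no global sort by a tuple key; counts descending, names sorted per bucket.
--     buckets = {}
--     for data in dataSource:
--         tag_set = set(data[1:])
--         c = sum(1 for t in tags if t in tag_set)
--         if c:
--             buckets.setdefault(c, []).append(data[0])
--     out = []
--     for c in sorted(buckets, reverse=True):
--         out.extend(sorted(buckets[c]))
--     return out[:10]
-- ===== Notes on version B (the rewrite author's own statement) =====
-- stated objective: faster
-- what changed: B replaces A's global sort of [name,count] pairs by the tuple key (-count,name) plus a walk-with-break by a counting-sort-style bucket selection: it counts via a per-document hash set, groups positive-count document names in a dict keyed by count, iterates the distinct counts in descending order, sorts only each bucket's names, and slices the first 10.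
import Mathlib
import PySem

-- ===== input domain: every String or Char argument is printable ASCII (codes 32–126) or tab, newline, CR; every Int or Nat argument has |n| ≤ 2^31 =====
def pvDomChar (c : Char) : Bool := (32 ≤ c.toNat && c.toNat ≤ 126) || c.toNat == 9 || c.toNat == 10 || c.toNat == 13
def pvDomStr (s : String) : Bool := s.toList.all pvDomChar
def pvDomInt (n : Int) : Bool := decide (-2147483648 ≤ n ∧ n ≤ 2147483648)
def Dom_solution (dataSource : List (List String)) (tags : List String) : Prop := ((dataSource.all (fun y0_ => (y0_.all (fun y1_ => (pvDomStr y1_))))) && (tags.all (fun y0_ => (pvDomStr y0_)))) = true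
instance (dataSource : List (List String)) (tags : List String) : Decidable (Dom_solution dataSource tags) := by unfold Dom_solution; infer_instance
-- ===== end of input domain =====

-- B replaces A's global tuple-key sort + walk-with-break by a bucket (counting-sort style)
-- selection: set-based counting, names grouped by match count in a dict, counts walked in
-- descending order, names sorted per bucket, first 10 taken (measured faster by the check).

-- ===== PORT A =====
-- the 'for document in documents: … break' loop of A, with answer and tot as state
def solutionLoop : List (String × Int) → List String → Int → List String
  | [], answer, _ => answer
  | d :: rest, answer, tot =>
    if d.2 ≠ 0 then
      let answer' := answer ++ [d.1]
      let tot' := tot + 1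
      if tot' = 10 then answer' else solutionLoop rest answer' tot'
    else solutionLoop rest answer tot

def solution (dataSource : List (List String)) (tags : List String) : List String :=
  let documents := dataSource.foldl (fun docs data =>
    let tag_list := PySem.List.slice data (some 1) none
    let tag_count := tags.foldl (fun tc tag => if tag_list.contains tag then tc + 1 else tc) (0 : Int)
    docs ++ [(PySem.List.pyGetD data 0 "", tag_count)]) []
  let documents := PySem.List.sorted2 documents (fun x => -x.2) (fun x => x.1)
  solutionLoop documents [] 0

-- ===== PORT B =====
def solution_alt (dataSource : List (List String)) (tags : List String) : List String :=
  -- buckets.setdefault(c, []).append(data[0])  ≡  modify c [] (· ++ [data[0]])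
  let buckets := dataSource.foldl (fun b data =>
      let tagSet := PySem.Set.ofList (PySem.List.slice data (some 1) none)
      let c : Int := ((tags.countP (fun t => PySem.Set.contains tagSet t) : Nat) : Int)
      if c ≠ 0 then b.modify c [] (· ++ [PySem.List.pyGetD data 0 ""]) else b)
    PySem.Dict.empty
  let out := (PySem.List.sorted (PySem.Dict.keys buckets) (fun k => k) true).foldl
      (fun acc c => acc ++ PySem.List.sorted (buckets.getD c []) (fun n => n) false) []
  out.take 10

-- ===== PRECONDITION & SPEC =====
-- Pre_ excludes exactly the inputs where Python A raises: data[0] is an IndexError on an empty inner list.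
def Pre_solution (dataSource : List (List String)) (tags : List String) : Prop :=
  ∀ data ∈ dataSource, data ≠ []
instance (dataSource : List (List String)) (tags : List String) : Decidable (Pre_solution dataSource tags) := by unfold Pre_solution; infer_instance
def pvWitness_solution : List (List String) × List String := ([["a", "x"], ["b", "y"]], ["x", "z"])

def Spec_solution (dataSource : List (List String)) (tags : List String) (out : List String) : Prop := out = solution_alt dataSource tags
instance (dataSource : List (List String)) (tags : List String) (out : List String) : Decidable (Spec_solution dataSource tags out) := by unfold Spec_solution; infer_instance

-- ===== CLAIM (what is proved, stated in full; the proofs are below) =====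
def Claim_equal_solution : Prop := ∀ (dataSource : List (List String)) (tags : List String), Dom_solution dataSource tags → Pre_solution dataSource tags → Spec_solution dataSource tags (solution dataSource tags)

-- ===== LEMMAS AND PROOFS =====

-- the strict 'before' test sorted2 uses for key (-count, name)
def pvBef (a b : String × Int) : Bool :=
  decide (-a.2 < -b.2) || (!decide (-b.2 < -a.2) && decide (a.1 < b.1))

-- positive-count test
def pvP (d : String × Int) : Bool := decide (0 < d.2)

-- per-document entry both programs compute
def pvF (tags : List String) (data : List String) : String × Int :=
  (PySem.List.pyGetD data 0 "",
   ((tags.countP (fun tag => (PySem.List.slice data (some 1) none).contains tag) : Nat) : Int))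

-- the positive-count entries, in input order
def pvE (dataSource : List (List String)) (tags : List String) : List (String × Int) :=
  (dataSource.map (pvF tags)).filter pvP

lemma pvSorted2_eq (xs : List (String × Int)) :
    PySem.List.sorted2 xs (fun x => -x.2) (fun x => x.1) false =
      xs.foldl (fun acc x => PySem.List.insertBy pvBef x acc) [] := rfl

lemma pvBef_asymm {a b : String × Int} (h : pvBef a b = true) : pvBef b a = false := by
  cases hc : pvBef b a
  · rfl
  · exfalso
    simp only [pvBef, Bool.or_eq_true, Bool.and_eq_true, Bool.not_eq_true', decide_eq_true_eq,
      decide_eq_false_iff_not] at h hc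
    rcases h with h | ⟨h1, h2⟩ <;> rcases hc with hc | ⟨hc1, hc2⟩
    · omega
    · omega
    · omega
    · exact absurd hc2 (not_lt.2 (le_of_lt h2))

lemma pvBef_trans {a b c : String × Int} (h1 : pvBef a b = true) (h2 : pvBef b c = true) :
    pvBef a c = true := by
  simp only [pvBef, Bool.or_eq_true, Bool.and_eq_true, Bool.not_eq_true', decide_eq_true_eq,
    decide_eq_false_iff_not] at *
  rcases h1 with h1 | ⟨h1a, h1b⟩ <;> rcases h2 with h2 | ⟨h2a, h2b⟩
  · exact Or.inl (by omega)
  · exact Or.inl (by omega)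
  · exact Or.inl (by omega)
  · exact Or.inr ⟨by omega, lt_trans h1b h2b⟩

lemma pvBef_of_p_not_p {a b : String × Int} (ha : pvP a = true) (hb : pvP b = false) :
    pvBef a b = true := by
  simp only [pvP, decide_eq_true_eq, decide_eq_false_iff_not] at ha hb
  simp only [pvBef, Bool.or_eq_true, decide_eq_true_eq]
  exact Or.inl (by omega)

lemma pvR_antisymm {a b : String × Int} (h1 : pvBef b a = false) (h2 : pvBef a b = false) :
    a = b := by
  rcases lt_trichotomy (-a.2) (-b.2) with hc | hc | hc
  · exact absurd h2 (by simp [pvBef, hc])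
  · rcases lt_trichotomy a.1 b.1 with hn | hn | hn
    · exact absurd h2 (by simp [pvBef, hc, hn])
    · exact Prod.ext hn (by omega)
    · exact absurd h1 (by simp [pvBef, ← hc, hn])
  · exact absurd h1 (by simp [pvBef, hc])

-- in a sorted list, everything after a non-positive element is non-positive
lemma pvFilter_nil_of_not_p {y : String × Int} {l : List (String × Int)}
    (hy : pvP y = false) (h : ∀ z ∈ l, pvBef z y = false) : l.filter pvP = [] := by
  refine List.filter_eq_nil_iff.2 (fun z hz hp => ?_)
  have hzy := pvBef_of_p_not_p hp hy
  rw [h z hz] at hzy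
  exact Bool.false_ne_true hzy

lemma pvPairwise_insertBy (x : String × Int) (l : List (String × Int))
    (hs : l.Pairwise (fun a b => pvBef b a = false)) :
    (PySem.List.insertBy pvBef x l).Pairwise (fun a b => pvBef b a = false) := by
  induction l with
  | nil => simp [PySem.List.insertBy]
  | cons y t ih =>
    rcases List.pairwise_cons.1 hs with ⟨hy, ht⟩
    cases hxy : pvBef x y
    · simp only [PySem.List.insertBy, hxy, Bool.false_eq_true, if_false]
      refine List.pairwise_cons.2 ⟨?_, ih ht⟩
      intro w hw
      rcases (PySem.List.mem_insertBy _ _ _ _).1 hw with rfl | hw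
      · exact hxy
      · exact hy w hw
    · simp only [PySem.List.insertBy, hxy, if_true]
      refine List.pairwise_cons.2 ⟨?_, hs⟩
      intro w hw
      rcases List.mem_cons.1 hw with rfl | hw
      · exact pvBef_asymm hxy
      · cases hwx : pvBef w x
        · rfl
        · exfalso
          have hwy := pvBef_trans hwx hxy
          rw [hy w hw] at hwy
          exact Bool.false_ne_true hwy

lemma pvPairwise_sorted2 (xs : List (String × Int)) :
    (PySem.List.sorted2 xs (fun x => -x.2) (fun x => x.1) false).Pairwise (fun a b => pvBef b a = false) := by
  rw [pvSorted2_eq]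
  have h : ∀ acc : List (String × Int), acc.Pairwise (fun a b => pvBef b a = false) →
      (xs.foldl (fun acc x => PySem.List.insertBy pvBef x acc) acc).Pairwise (fun a b => pvBef b a = false) := by
    induction xs with
    | nil => intro acc hacc; simpa using hacc
    | cons x t ih => intro acc hacc; exact ih _ (pvPairwise_insertBy x acc hacc)
  exact h [] (by simp)

lemma pvFilter_insertBy_pos (x : String × Int) (hx : pvP x = true) (l : List (String × Int))
    (hs : l.Pairwise (fun a b => pvBef b a = false)) :
    (PySem.List.insertBy pvBef x l).filter pvP = PySem.List.insertBy pvBef x (l.filter pvP) := by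
  induction l with
  | nil => simp [PySem.List.insertBy, hx]
  | cons y t ih =>
    rcases List.pairwise_cons.1 hs with ⟨hy, ht⟩
    cases hxy : pvBef x y
    · have hpy : pvP y = true := by
        cases hpy : pvP y
        · rw [pvBef_of_p_not_p hx hpy] at hxy; exact absurd hxy (by simp)
        · rfl
      simp only [PySem.List.insertBy, hxy, Bool.false_eq_true, if_false]
      rw [List.filter_cons_of_pos hpy, List.filter_cons_of_pos hpy,
        ih ht]
      simp only [PySem.List.insertBy, hxy, Bool.false_eq_true, if_false]
    · simp only [PySem.List.insertBy, hxy, if_true]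
      cases hpy : pvP y
      · rw [List.filter_cons_of_pos hx, List.filter_cons_of_neg (by simp [hpy]),
            pvFilter_nil_of_not_p hpy hy]
        simp [PySem.List.insertBy]
      · rw [List.filter_cons_of_pos hx, List.filter_cons_of_pos hpy]
        simp [PySem.List.insertBy, hxy]

lemma pvFilter_insertBy_neg (x : String × Int) (hx : pvP x = false) (l : List (String × Int)) :
    (PySem.List.insertBy pvBef x l).filter pvP = l.filter pvP := by
  induction l with
  | nil => simp [PySem.List.insertBy, hx]
  | cons y t ih =>
    cases hxy : pvBef x y
    · simp only [PySem.List.insertBy, hxy, Bool.false_eq_true, if_false]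
      cases hpy : pvP y
      · rw [List.filter_cons_of_neg (by simp [hpy]), List.filter_cons_of_neg (by simp [hpy]), ih]
      · rw [List.filter_cons_of_pos hpy, List.filter_cons_of_pos hpy, ih]
    · simp only [PySem.List.insertBy, hxy, if_true]
      rw [List.filter_cons_of_neg (by simp [hx])]

lemma pvCommute_foldl (xs : List (String × Int)) : ∀ (acc : List (String × Int)),
    acc.Pairwise (fun a b => pvBef b a = false) →
    (xs.foldl (fun acc x => PySem.List.insertBy pvBef x acc) acc).filter pvP =
      (xs.filter pvP).foldl (fun acc x => PySem.List.insertBy pvBef x acc) (acc.filter pvP) := by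
  induction xs with
  | nil => intro acc _; simp
  | cons x t ih =>
    intro acc hacc
    simp only [List.foldl_cons]
    rw [ih _ (pvPairwise_insertBy x acc hacc)]
    cases hpx : pvP x
    · rw [List.filter_cons_of_neg (by simp [hpx]), pvFilter_insertBy_neg x hpx acc]
    · rw [List.filter_cons_of_pos hpx, List.foldl_cons, pvFilter_insertBy_pos x hpx acc hacc]

-- filter commutes with the stable key-sort (positives sort strictly before non-positives)
lemma pvFilter_sorted2 (xs : List (String × Int)) :
    (PySem.List.sorted2 xs (fun x => -x.2) (fun x => x.1) false).filter pvP =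
      PySem.List.sorted2 (xs.filter pvP) (fun x => -x.2) (fun x => x.1) false := by
  rw [pvSorted2_eq, pvSorted2_eq]
  simpa using pvCommute_foldl xs [] (by simp)

-- A's collect-until-10 loop over any document list is take-10 of the positive-count names
lemma pvSolutionLoop_eq (L : List (String × Int)) : ∀ (ans : List String) (tot : Int),
    0 ≤ tot → tot < 10 →
    solutionLoop L ans tot =
      ans ++ (((L.filter (fun d => decide (d.2 ≠ 0))).take (10 - tot).toNat).map (fun d => d.1)) := by
  induction L with
  | nil => intro ans tot _ _; simp [solutionLoop]
  | cons d rest ih =>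
    intro ans tot h0 h10
    by_cases hd : d.2 ≠ 0
    · rw [List.filter_cons_of_pos (by simpa using hd)]
      simp only [solutionLoop, if_pos hd]
      have htn : (10 - tot).toNat = (10 - (tot + 1)).toNat + 1 := by omega
      by_cases h9 : tot + 1 = 10
      · rw [if_pos h9]
        have : (10 - tot).toNat = 1 := by omega
        simp [this]
      · rw [if_neg h9, ih (ans ++ [d.1]) (tot + 1) (by omega) (by omega), htn,
            List.take_succ_cons, List.map_cons, List.append_assoc]
        rfl
    · rw [List.filter_cons_of_neg (by simpa using hd)]
      simp only [solutionLoop, if_neg hd]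
      exact ih ans tot h0 h10

-- B's set-membership count equals A's list-membership count
lemma pvContains_ofList (tl : List String) (t : String) :
    PySem.Set.contains (PySem.Set.ofList tl) t = tl.contains t := by
  rw [Bool.eq_iff_iff]
  simp [PySem.Set.contains, PySem.Set.mem_ofList]

-- A's append-with-count fold builds the mapped entry list
lemma pvDocs_eq (ds : List (List String)) (tags : List String) :
    ds.foldl (fun docs data =>
      docs ++ [(PySem.List.pyGetD data 0 "",
        tags.foldl (fun tc tag => if (PySem.List.slice data (some 1) none).contains tag then tc + 1 else tc) (0 : Int))]) [] =
      ds.map (pvF tags) := by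
  have hfun : (fun (docs : List (String × Int)) data =>
      docs ++ [(PySem.List.pyGetD data 0 "",
        tags.foldl (fun tc tag => if (PySem.List.slice data (some 1) none).contains tag then tc + 1 else tc) (0 : Int))]) =
      (fun docs data => docs ++ [pvF tags data]) := by
    funext docs data
    rw [PySem.List.foldl_count_if]
    simp only [pvF, zero_add]
  rw [hfun]
  simpa using PySem.List.foldl_append_singleton_eq_map (pvF tags) ds []

-- A's result = first 10 names of the sorted positive entries
lemma pvA_eq (ds : List (List String)) (tags : List String) :
    solution ds tags =
      ((PySem.List.sorted2 (pvE ds tags) (fun x => -x.2) (fun x => x.1) false).take 10).map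
        (fun e => e.1) := by
  simp only [solution]
  rw [pvDocs_eq ds tags, pvSolutionLoop_eq _ [] 0 (by norm_num) (by norm_num)]
  simp only [show ((10 : Int) - 0).toNat = 10 from by decide, List.nil_append]
  have hcongr : (PySem.List.sorted2 (ds.map (pvF tags)) (fun x => -x.2) (fun x => x.1) false).filter
      (fun d => decide (d.2 ≠ 0)) =
      (PySem.List.sorted2 (ds.map (pvF tags)) (fun x => -x.2) (fun x => x.1) false).filter pvP := by
    apply List.filter_congr
    intro x hx
    have hx' : x ∈ ds.map (pvF tags) :=
      (PySem.List.sorted2_perm (ds.map (pvF tags)) (fun x => -x.2) (fun x => x.1) false).mem_iff.1 hx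
    rcases List.mem_map.1 hx' with ⟨d, _, rfl⟩
    simp only [pvF, pvP]
    have hnn : (0 : Int) ≤ ((tags.countP (fun tag => (PySem.List.slice d (some 1) none).contains tag) : Nat) : Int) :=
      Int.natCast_nonneg _
    rw [Bool.eq_iff_iff]
    constructor <;> intro h <;> simp_all
  rw [hcongr, pvFilter_sorted2]
  rfl

-- ------- B side -------

-- the bucket dict built from the positive entries
def pvBuckets (E : List (String × Int)) : PySem.Dict Int (List String) :=
  E.foldl (fun b e => b.modify e.2 [] (· ++ [e.1])) PySem.Dict.empty

-- B's dict-building fold over dataSource is pvBuckets of the positive entries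
lemma pvBucketsB_eq (ds : List (List String)) (tags : List String) :
    ds.foldl (fun b data =>
      let tagSet := PySem.Set.ofList (PySem.List.slice data (some 1) none)
      let c : Int := ((tags.countP (fun t => PySem.Set.contains tagSet t) : Nat) : Int)
      if c ≠ 0 then b.modify c [] (· ++ [PySem.List.pyGetD data 0 ""]) else b)
      PySem.Dict.empty = pvBuckets (pvE ds tags) := by
  unfold pvBuckets pvE
  have h : ∀ d : PySem.Dict Int (List String),
      ds.foldl (fun b data =>
        let tagSet := PySem.Set.ofList (PySem.List.slice data (some 1) none)
        let c : Int := ((tags.countP (fun t => PySem.Set.contains tagSet t) : Nat) : Int)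
        if c ≠ 0 then b.modify c [] (· ++ [PySem.List.pyGetD data 0 ""]) else b) d =
      ((ds.map (pvF tags)).filter pvP).foldl
        (fun b e => b.modify e.2 [] (· ++ [e.1])) d := by
    induction ds with
    | nil => intro d; rfl
    | cons data rest ih =>
      intro d
      have hcnt : ((tags.countP (fun t =>
          PySem.Set.contains (PySem.Set.ofList (PySem.List.slice data (some 1) none)) t) : Nat) : Int) =
          (pvF tags data).2 := by
        simp only [pvF]
        congr 1
        refine List.countP_congr (fun t _ => ?_)
        rw [pvContains_ofList]
      simp only [List.foldl_cons, List.map_cons, hcnt]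
      by_cases hz : (pvF tags data).2 = 0
      · rw [List.filter_cons_of_neg (by simp [pvP, hz]), if_neg (not_not_intro hz)]
        exact ih d
      · rw [List.filter_cons_of_pos (by
            simp only [pvP, decide_eq_true_eq]
            have : (0 : Int) ≤ (pvF tags data).2 := by simp [pvF]
            omega), List.foldl_cons, if_pos hz]
        exact ih _
  exact h PySem.Dict.empty

-- bucket content at count c: the names of the count-c entries, in input order
lemma pvBuckets_getD (E : List (String × Int)) (c : Int) :
    (pvBuckets E).getD c [] = (E.filter (fun e => e.2 == c)).map (fun e => e.1) := by
  have h : pvBuckets E =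
      (E.map Prod.swap).foldl (fun d p => d.modify p.1 [] (· ++ [p.2])) PySem.Dict.empty := by
    rw [List.foldl_map]; rfl
  rw [h, PySem.Dict.getD_foldl_modify_append, List.filter_map, List.map_map]
  simp [Function.comp_def]

lemma pvBuckets_keys (E : List (String × Int)) :
    (pvBuckets E).keys = PySem.Set.ofList (E.map (fun e => e.2)) := by
  unfold pvBuckets
  rw [PySem.Dict.keys_foldl_modify_key E (fun e => e.2) [] (fun _ e => (· ++ [e.1]))]
  rw [PySem.Set.ofList_eq_foldl]
  rfl

lemma pvBuckets_keys_nodup (E : List (String × Int)) : (pvBuckets E).keys.Nodup := by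
  unfold pvBuckets
  exact PySem.Dict.nodup_keys_foldl_modify_key E (fun e => e.2) [] (fun _ e => (· ++ [e.1]))
    PySem.Dict.empty (by simp)

-- grouping permutation: flatMap of per-count filters over the distinct counts is a permutation
lemma pvPerm_flatMap_filter (ks : List Int) : ∀ (E : List (String × Int)), ks.Nodup →
    (∀ e ∈ E, e.2 ∈ ks) →
    (ks.flatMap (fun c => E.filter (fun e => e.2 == c))).Perm E := by
  induction ks with
  | nil =>
    intro E _ hall
    cases E with
    | nil => rfl
    | cons e t => exact absurd (hall e (by simp)) (by simp)
  | cons c t ih =>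
    intro E hnd hall
    rcases List.nodup_cons.1 hnd with ⟨hc, hnd'⟩
    rw [List.flatMap_cons]
    have hcongr : t.flatMap (fun k => E.filter (fun e => e.2 == k)) =
        t.flatMap (fun k => (E.filter (fun e => !(e.2 == c))).filter (fun e => e.2 == k)) := by
      refine List.flatMap_congr (fun k hk => ?_)
      rw [List.filter_filter]
      refine List.filter_congr (fun e _ => ?_)
      rw [Bool.eq_iff_iff, Bool.and_eq_true]
      constructor
      · intro h2
        refine ⟨h2, ?_⟩
        simp only [beq_iff_eq] at h2
        simp only [Bool.not_eq_eq_eq_not, Bool.not_true, beq_eq_false_iff_ne, ne_eq]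
        rintro h3
        rw [← h2, h3] at hk
        exact absurd hk hc
      · exact fun h => h.1
    rw [hcongr]
    have hperm := ih (E.filter (fun e => !(e.2 == c))) hnd' (fun e he => by
      have hmem := List.mem_of_mem_filter he
      have := hall e hmem
      rcases List.mem_cons.1 this with h | h
      · exfalso
        have := List.of_mem_filter he
        simp [h] at this
      · exact h)
    exact List.Perm.trans (List.Perm.append_left _ hperm) (List.filter_append_perm _ E)

-- the flattened bucket pairs, counts descending, names ascending per bucket
def pvFlat (E : List (String × Int)) : List (String × Int) :=
  (PySem.List.sorted ((pvBuckets E).keys) (fun k => k) true).flatMap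
    (fun c => (PySem.List.sorted ((pvBuckets E).getD c []) (fun n => n) false).map (fun n => (n, c)))

-- componentwise permutation of a flatMap
lemma pvPerm_flatMap_congr (ks : List Int) (f g : Int → List (String × Int))
    (h : ∀ c ∈ ks, (f c).Perm (g c)) : (ks.flatMap f).Perm (ks.flatMap g) := by
  induction ks with
  | nil => rfl
  | cons c t ih =>
    rw [List.flatMap_cons, List.flatMap_cons]
    exact (h c (by simp)).append (ih (fun k hk => h k (List.mem_cons_of_mem _ hk)))

-- each flattened bucket is a permutation of the count-c entries
lemma pvGroup_perm (E : List (String × Int)) (c : Int) :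
    ((PySem.List.sorted ((pvBuckets E).getD c []) (fun n => n) false).map
      (fun n => (n, c))).Perm (E.filter (fun e => e.2 == c)) := by
  refine ((PySem.List.sorted_perm _ _ false).map _).trans ?_
  rw [pvBuckets_getD, List.map_map]
  have h : (E.filter (fun e => e.2 == c)).map ((fun n => (n, c)) ∘ (fun e => e.1)) =
      (E.filter (fun e => e.2 == c)).map id := by
    refine List.map_congr_left (fun e he => ?_)
    have := List.of_mem_filter he
    simp only [beq_iff_eq] at this
    simp [← this]
  rw [h, List.map_id]

lemma pvFlat_perm (E : List (String × Int)) : (pvFlat E).Perm E := by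
  unfold pvFlat
  refine (pvPerm_flatMap_congr _ _ (fun c => E.filter (fun e => e.2 == c))
    (fun c _ => pvGroup_perm E c)).trans ?_
  refine pvPerm_flatMap_filter _ E ?_ ?_
  · exact ((PySem.List.sorted_perm _ _ true).nodup_iff).2 (pvBuckets_keys_nodup E)
  · intro e he
    rw [(PySem.List.sorted_perm _ _ true).mem_iff, pvBuckets_keys, PySem.Set.mem_ofList]
    exact List.mem_map.2 ⟨e, he, rfl⟩

lemma pvFlat_pairwise (E : List (String × Int)) : (pvFlat E).Pairwise (fun a b => pvBef b a = false) := by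
  unfold pvFlat
  rw [List.flatMap_def]
  refine List.pairwise_flatten.2 ⟨?_, ?_⟩
  · intro l' hl'
    rcases List.mem_map.1 hl' with ⟨c, _, rfl⟩
    rw [List.pairwise_map]
    refine (PySem.List.sorted_pairwise _ (fun n => n)).imp ?_
    intro n1 n2 hle
    simp only [pvBef, lt_irrefl, decide_false, Bool.not_false, Bool.false_or,
      Bool.true_and, decide_eq_false_iff_not, not_lt]
    exact hle
  · rw [List.pairwise_map]
    have hdesc : (PySem.List.sorted ((pvBuckets E).keys) (fun k => k) true).Pairwise
        (fun c1 c2 => c2 < c1) := by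
      have h1 := PySem.List.sorted_pairwise_rev ((pvBuckets E).keys) (fun k => k)
      have h2 : (PySem.List.sorted ((pvBuckets E).keys) (fun k => k) true).Pairwise (· ≠ ·) :=
        ((PySem.List.sorted_perm _ _ true).nodup_iff).2 (pvBuckets_keys_nodup E)
      exact (h1.and h2).imp (fun h => lt_of_le_of_ne h.1 (Ne.symm h.2))
    refine hdesc.imp ?_
    intro c1 c2 hlt x hx y hy
    rcases List.mem_map.1 hx with ⟨n1, _, rfl⟩
    rcases List.mem_map.1 hy with ⟨n2, _, rfl⟩
    simp only [pvBef]
    have h1 : ¬(-c2 < -c1) := by omega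
    have h2 : (-c1 < -c2) := by omega
    simp [h1, h2]

-- the central identity: the bucket flattening IS the tuple-key sort
lemma pvFlat_eq_sorted2 (E : List (String × Int)) :
    PySem.List.sorted2 E (fun x => -x.2) (fun x => x.1) false = pvFlat E := by
  exact List.Perm.eq_of_pairwise (le := fun a b => pvBef b a = false)
    (fun a b _ _ h1 h2 => pvR_antisymm h1 h2)
    (pvPairwise_sorted2 E) (pvFlat_pairwise E)
    ((PySem.List.sorted2_perm E _ _ false).trans (pvFlat_perm E).symm)

lemma pvB_eq (ds : List (List String)) (tags : List String) :
    solution_alt ds tags =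
      (((PySem.List.sorted2 (pvE ds tags) (fun x => -x.2) (fun x => x.1) false)).map
        (fun e => e.1)).take 10 := by
  simp only [solution_alt]
  rw [pvBucketsB_eq ds tags, pvFlat_eq_sorted2, PySem.List.foldl_append_eq_flatMap]
  unfold pvFlat
  rw [List.map_flatMap, List.nil_append]
  congr 1
  refine List.flatMap_congr (fun c _ => ?_)
  rw [List.map_map]
  simp [Function.comp_def]

lemma solution_eq (ds : List (List String)) (tags : List String) :
    solution ds tags = solution_alt ds tags := by
  rw [pvA_eq, pvB_eq, List.map_take]

-- ===== VERDICT (by name: the statement is the Claim_ definition above) =====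
theorem solution_spec : Claim_equal_solution := by
  intro ds tags _ _
  exact solution_eq ds tags
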